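-- pv_equiv track=rewrite | github.com/rmelu/ITS-Python | copmpiti pasquali/Esercizi_ripasso_sulle_funzioni/EX_3.py | rimuovi_elementi
-- ===== SOURCE A (Python) =====
-- from typing import List, Dict, Any
-- from typing import List, Dict
--
-- def rimuovi_elementi(lista: List[Any], da_rimuovere: Dict[Any, int]) -> List[Any]:
--     """
--     Elimina da una lista dati elementi specificati in un dizionario.
--
--     Args:
--         lista: La lista da cui rimuovere gli elementi.
--         da_rimuovere: Un dizionario dove le chiavi sono gli elementi da rimuovere
--                       e i valori sono il numero di volte che devono essere rimossi.
--
--     Returns: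
--         Una nuova lista con gli elementi rimossi.
--     """
--     nuova_lista: List[Any] = list(lista) # Crea una copia per non modificare l'originale
--     for elemento, count in da_rimuovere.items():
--         try:
--             for _ in range(count):
--                 nuova_lista.remove(elemento)
--         except ValueError:
--             # Se l'elemento non è più presente nella lista, ignora l'errore
--             pass
--     return nuova_lista
-- ===== SOURCE B (Python) =====
-- from typing import List, Dict, Any
--
-- def rimuovi_elementi(lista: List[Any], da_rimuovere: Dict[Any, int]) -> List[Any]:
--     remaining = dict(da_rimuovere)
--     risultato: List[Any] = []
--     for x in lista:
--         if remaining.get(x, 0) > 0: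
--             remaining[x] = remaining[x] - 1
--         else:
--             risultato.append(x)
--     return risultato
-- ===== Notes on version B (the rewrite author's own statement) =====
-- stated objective: faster
-- what changed: Instead of calling list.remove repeatedly for every key (each remove rescans the list), B makes one pass over the list with a decrementing copy of the counts dict, skipping the first count occurrences of each key.
import Mathlib
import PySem

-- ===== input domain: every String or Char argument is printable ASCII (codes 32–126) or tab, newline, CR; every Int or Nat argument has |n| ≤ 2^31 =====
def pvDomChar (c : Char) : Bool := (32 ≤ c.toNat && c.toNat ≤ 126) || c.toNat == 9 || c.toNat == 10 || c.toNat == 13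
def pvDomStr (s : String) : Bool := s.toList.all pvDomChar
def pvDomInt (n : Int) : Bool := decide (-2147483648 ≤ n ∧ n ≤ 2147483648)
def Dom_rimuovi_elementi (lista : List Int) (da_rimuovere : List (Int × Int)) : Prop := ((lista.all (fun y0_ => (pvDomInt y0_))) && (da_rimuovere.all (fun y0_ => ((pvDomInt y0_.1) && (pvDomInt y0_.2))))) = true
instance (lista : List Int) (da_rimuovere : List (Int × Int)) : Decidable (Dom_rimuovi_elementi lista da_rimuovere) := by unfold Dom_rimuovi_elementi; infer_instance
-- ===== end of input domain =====

-- B replaces A's per-key repeated list.remove scans with one pass over the list and a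
-- decrementing copy of the counts dict (objective: faster, asymptotic).

-- ===== PORT A =====
-- inner 'for _ in range(count): nuova_lista.remove(elemento)' with the ValueError caught:
-- fuel = count.toNat iterations; remove? = none (ValueError) stops the loop, list unchanged.
def removeLoopA (k : Int) : Nat → List Int → List Int
  | 0, xs => xs
  | n + 1, xs =>
    match PySem.List.remove? xs k with
    | none => xs
    | some ys => removeLoopA k n ys

def rimuovi_elementi (lista : List Int) (da_rimuovere : List (Int × Int)) : List Int :=
  (PySem.Dict.ofList da_rimuovere).items.foldl
    (fun nuova p => removeLoopA p.1 p.2.toNat nuova) lista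

-- ===== PORT B =====
-- one pass: skip x and decrement while remaining.get(x, 0) > 0, else keep x.
def passB : List Int → PySem.Dict Int Int → List Int
  | [], _ => []
  | x :: xs, d =>
    if 0 < d.getD x 0 then passB xs (d.modify x 0 (· - 1))
    else x :: passB xs d

def rimuovi_elementi_alt (lista : List Int) (da_rimuovere : List (Int × Int)) : List Int :=
  passB lista (PySem.Dict.ofList da_rimuovere)

-- ===== PRECONDITION & SPEC =====
def Spec_rimuovi_elementi (lista : List Int) (da_rimuovere : List (Int × Int)) (out : List Int) : Prop := out = rimuovi_elementi_alt lista da_rimuovere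
instance (lista : List Int) (da_rimuovere : List (Int × Int)) (out : List Int) : Decidable (Spec_rimuovi_elementi lista da_rimuovere out) := by unfold Spec_rimuovi_elementi; infer_instance

-- ===== CLAIM (what is proved, stated in full; the proofs are below) =====
def Claim_equal_rimuovi_elementi : Prop := ∀ (lista : List Int) (da_rimuovere : List (Int × Int)), Dom_rimuovi_elementi lista da_rimuovere → Spec_rimuovi_elementi lista da_rimuovere (rimuovi_elementi lista da_rimuovere)

-- ===== LEMMAS AND PROOFS =====

-- proof-only: remove the first (max c 0) occurrences of k, in one pass
def skipC (k : Int) : Int → List Int → List Int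
  | _, [] => []
  | c, x :: xs => if x = k ∧ 0 < c then skipC k (c - 1) xs else x :: skipC k c xs

-- proof-only: B's pass with the counts as a plain function
def fSim : List Int → (Int → Int) → List Int
  | [], _ => []
  | x :: xs, g =>
    if 0 < g x then fSim xs (fun y => if y = x then g x - 1 else g y)
    else x :: fSim xs g

-- proof-only: head-first functional lookup extending g by the pairs of L
def gOf : List (Int × Int) → (Int → Int) → Int → Int
  | [], g => g
  | (k, c) :: rest, g => fun y => if y = k then c else gOf rest g y

theorem skipC_cons_pos (k c : Int) (x : Int) (xs : List Int) (hx : x = k) (hc : 0 < c) :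
    skipC k c (x :: xs) = skipC k (c - 1) xs := by
  simp [skipC, hx, hc]

theorem skipC_cons_keep (k c : Int) (x : Int) (xs : List Int) (h : ¬ (x = k ∧ 0 < c)) :
    skipC k c (x :: xs) = x :: skipC k c xs := by
  simp only [skipC, if_neg h]

theorem skipC_nonpos (k : Int) (c : Int) (hc : c ≤ 0) : ∀ xs, skipC k c xs = xs := by
  intro xs
  induction xs with
  | nil => rfl
  | cons x xs ih => rw [skipC_cons_keep k c x xs (by rintro ⟨_, h⟩; omega), ih]

theorem skipC_succ (k : Int) (n : Nat) :
    ∀ xs, skipC k ((n : Int) + 1) xs =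
      match PySem.List.remove? xs k with
      | none => xs
      | some ys => skipC k (n : Int) ys := by
  intro xs
  induction xs with
  | nil => simp [skipC, PySem.List.remove?]
  | cons x xs ih =>
    by_cases hx : x = k
    · rw [hx, PySem.List.remove?_cons_self,
        skipC_cons_pos k _ k xs rfl (by positivity)]
      norm_num
    · rw [PySem.List.remove?_cons_of_ne xs hx,
        skipC_cons_keep k _ x xs (by rintro ⟨h, _⟩; exact hx h), ih]
      cases h : PySem.List.remove? xs k with
      | none => rfl
      | some ys =>
        simp only [Option.map_some]
        exact (skipC_cons_keep k _ x ys (by rintro ⟨h', _⟩; exact hx h')).symm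

theorem removeLoopA_nat (k : Int) : ∀ (n : Nat) (xs : List Int),
    removeLoopA k n xs = skipC k (n : Int) xs := by
  intro n
  induction n with
  | zero =>
    intro xs
    rw [show ((0 : Nat) : Int) = 0 from rfl, skipC_nonpos k 0 le_rfl xs]
    rfl
  | succ m ih =>
    intro xs
    rw [show removeLoopA k (m + 1) xs =
          (match PySem.List.remove? xs k with
           | none => xs
           | some ys => removeLoopA k m ys) from rfl]
    rw [show ((m + 1 : Nat) : Int) = (m : Int) + 1 by push_cast; ring,
      skipC_succ k m xs]
    cases h : PySem.List.remove? xs k with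
    | none => rfl
    | some ys => exact ih ys

theorem removeLoopA_eq_skipC (k : Int) (c : Int) (xs : List Int) :
    removeLoopA k c.toNat xs = skipC k c xs := by
  by_cases hc : c ≤ 0
  · rw [skipC_nonpos k c hc, Int.toNat_of_nonpos hc]
    rfl
  · rw [removeLoopA_nat k c.toNat xs, Int.toNat_of_nonneg (by omega)]

theorem passB_eq_fSim (xs : List Int) (d : PySem.Dict Int Int) :
    passB xs d = fSim xs (fun y => d.getD y 0) := by
  induction xs generalizing d with
  | nil => rfl
  | cons x xs ih =>
    simp only [passB, fSim]
    split_ifs with h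
    · rw [ih]
      congr 1
      funext y
      rw [PySem.Dict.getD_modify]
    · rw [ih]

theorem fSim_id (g : Int → Int) (hg : ∀ y, g y ≤ 0) : ∀ xs, fSim xs g = xs := by
  intro xs
  induction xs with
  | nil => rfl
  | cons x xs ih =>
    have := hg x
    rw [fSim, if_neg (by omega), ih]

theorem fSim_skipC (k : Int) :
    ∀ (xs : List Int) (c : Int) (g : Int → Int), g k ≤ 0 →
      fSim (skipC k c xs) g = fSim xs (fun y => if y = k then c else g y) := by
  intro xs
  induction xs with
  | nil => intro c g _; rfl
  | cons x xs ih =>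
    intro c g hg
    by_cases hx : x = k
    · subst hx
      by_cases hc : 0 < c
      · rw [skipC_cons_pos x c x xs rfl hc, ih (c - 1) g hg]
        simp only [fSim, if_true]
        rw [if_pos hc]
        congr 1
        funext y
        by_cases hy : y = x <;> simp [hy]
      · rw [skipC_cons_keep x c x xs (by rintro ⟨_, h⟩; exact hc h)]
        simp only [fSim, if_true]
        rw [if_neg (show ¬ (0 : Int) < g x from by omega), if_neg hc, ih c g hg]
    · rw [skipC_cons_keep k c x xs (by rintro ⟨h, _⟩; exact hx h)]
      simp only [fSim, hx, if_false]
      by_cases h : 0 < g x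
      · rw [if_pos h, if_pos h,
          ih c (fun y => if y = x then g x - 1 else g y)
            (by simp only [if_neg (show ¬ k = x from fun h' => hx h'.symm)]; exact hg)]
        congr 1
        funext y
        have hx' : ¬ k = x := fun h' => hx h'.symm
        by_cases hyx : y = x
        · simp [hyx, hx]
        · by_cases hy : y = k <;> simp [hy, hyx, hx']
      · rw [if_neg h, if_neg h, ih c g hg]

theorem gOf_not_mem (L : List (Int × Int)) (g : Int → Int) (k : Int)
    (hk : k ∉ L.map Prod.fst) : gOf L g k = g k := by
  induction L with
  | nil => rfl
  | cons p rest ih =>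
    obtain ⟨k', c⟩ := p
    simp only [List.map_cons, List.mem_cons] at hk
    push Not at hk
    show (if k = k' then c else gOf rest g k) = g k
    rw [if_neg hk.1]
    exact ih hk.2

theorem foldl_skipC_eq_fSim :
    ∀ (L : List (Int × Int)) (xs : List Int) (g : Int → Int),
      (L.map Prod.fst).Nodup → (∀ y, g y ≤ 0) →
      L.foldl (fun acc p => skipC p.1 p.2 acc) xs = fSim xs (gOf L g) := by
  intro L
  induction L with
  | nil =>
    intro xs g _ hg
    rw [List.foldl_nil, gOf, fSim_id g hg]
  | cons p rest ih =>
    intro xs g hnd hg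
    obtain ⟨k, c⟩ := p
    simp only [List.map_cons, List.nodup_cons] at hnd
    rw [List.foldl_cons, ih (skipC k c xs) g hnd.2 hg,
      fSim_skipC k xs c (gOf rest g)
        (by rw [gOf_not_mem rest g k hnd.1]; exact hg k)]
    rfl

theorem gOf_eq_getD (L : List (Int × Int)) (y : Int) :
    gOf L (fun _ => 0) y = (PySem.Dict.mk L).getD y 0 := by
  induction L with
  | nil => simp [gOf, PySem.Dict.getD, PySem.Dict.get?]
  | cons p rest ih =>
    obtain ⟨k, c⟩ := p
    show (if y = k then c else gOf rest (fun _ => 0) y) = _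
    rw [PySem.Dict.getD_eq_get?_getD, PySem.Dict.get?_mk_cons]
    by_cases hy : y = k
    · rw [if_pos hy, if_pos (by exact beq_iff_eq.mpr hy.symm)]
      rfl
    · rw [if_neg hy, if_neg (by simp only [beq_iff_eq]; exact fun h => hy h.symm), ← PySem.Dict.getD_eq_get?_getD, ih]

theorem dict_mk_items {κ ν : Type} [BEq κ] (d : PySem.Dict κ ν) : PySem.Dict.mk d.items = d := by
  cases d
  rfl

-- ===== VERDICT (by name: the statement is the Claim_ definition above) =====
theorem rimuovi_elementi_spec : Claim_equal_rimuovi_elementi := by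
  unfold Claim_equal_rimuovi_elementi
  intro lista da _
  unfold Spec_rimuovi_elementi rimuovi_elementi rimuovi_elementi_alt
  rw [show (fun (nuova : List Int) (p : Int × Int) => removeLoopA p.1 p.2.toNat nuova)
        = fun nuova p => skipC p.1 p.2 nuova from
      funext fun nuova => funext fun p => removeLoopA_eq_skipC p.1 p.2 nuova]
  rw [foldl_skipC_eq_fSim (PySem.Dict.ofList da).items lista (fun _ => 0)
        (PySem.Dict.nodup_keys_ofList da) (fun _ => le_rfl)]
  rw [passB_eq_fSim lista (PySem.Dict.ofList da)]
  congr 1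
  funext y
  rw [gOf_eq_getD, dict_mk_items]
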